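-- pv_equiv track=rewrite | github.com/abi765/nuar-mini-project | convert_notebooks_to_databricks.py | split_into_cells
-- ===== SOURCE A (Python) =====
-- def split_into_cells(content):
--     """Split long code blocks into Databricks cells"""
--
--     # Add cell separators at logical points
--     markers = [
--         ('# CONFIGURATION', '# COMMAND ----------\n# MAGIC %md\n# MAGIC ## Configuration\n\n# COMMAND ----------'),
--         ('# STEP 1:', '# COMMAND ----------\n# MAGIC %md\n# MAGIC ## Step 1: Data Collection\n\n# COMMAND ----------'),
--         ('# STEP 2:', '# COMMAND ----------\n# MAGIC %md\n# MAGIC ## Step 2: Data Processing\n\n# COMMAND ----------'),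
--         ('# STEP 3:', '# COMMAND ----------\n# MAGIC %md\n# MAGIC ## Step 3: Save to Bronze Layer\n\n# COMMAND ----------'),
--         ('if __name__ == "__main__":', '# COMMAND ----------\n# MAGIC %md\n# MAGIC ## Main Execution\n\n# COMMAND ----------'),
--     ]
--
--     for marker, replacement in markers:
--         content = content.replace(marker, replacement)
--
--     return content
-- ===== SOURCE B (Python) =====
-- def split_into_cells(content):
--     """Split long code blocks into Databricks cells (single table-driven pass)"""
--     table = {
--         '# CONFIGURATION': '# COMMAND ----------\n# MAGIC %md\n# MAGIC ## Configuration\n\n# COMMAND ----------',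
--         '# STEP 1:': '# COMMAND ----------\n# MAGIC %md\n# MAGIC ## Step 1: Data Collection\n\n# COMMAND ----------',
--         '# STEP 2:': '# COMMAND ----------\n# MAGIC %md\n# MAGIC ## Step 2: Data Processing\n\n# COMMAND ----------',
--         '# STEP 3:': '# COMMAND ----------\n# MAGIC %md\n# MAGIC ## Step 3: Save to Bronze Layer\n\n# COMMAND ----------',
--         'if __name__ == "__main__":': '# COMMAND ----------\n# MAGIC %md\n# MAGIC ## Main Execution\n\n# COMMAND ----------',
--     }
--     out = []
--     i = 0
--     n = len(content)
--     while i < n: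
--         for marker, replacement in table.items():
--             if content.startswith(marker, i):
--                 out.append(replacement)
--                 i += len(marker)
--                 break
--         else:
--             out.append(content[i])
--             i += 1
--     return ''.join(out)
-- ===== Notes on version B (the rewrite author's own statement) =====
-- stated objective: alternative
-- what changed: A makes five sequential str.replace passes over the text (one per marker); B builds a marker-to-replacement table once and makes a single left-to-right scan that at each position emits the replacement of the first matching marker or copies the character, which is sound because no marker overlaps another or occurs in any replacement.
import Mathlib
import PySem

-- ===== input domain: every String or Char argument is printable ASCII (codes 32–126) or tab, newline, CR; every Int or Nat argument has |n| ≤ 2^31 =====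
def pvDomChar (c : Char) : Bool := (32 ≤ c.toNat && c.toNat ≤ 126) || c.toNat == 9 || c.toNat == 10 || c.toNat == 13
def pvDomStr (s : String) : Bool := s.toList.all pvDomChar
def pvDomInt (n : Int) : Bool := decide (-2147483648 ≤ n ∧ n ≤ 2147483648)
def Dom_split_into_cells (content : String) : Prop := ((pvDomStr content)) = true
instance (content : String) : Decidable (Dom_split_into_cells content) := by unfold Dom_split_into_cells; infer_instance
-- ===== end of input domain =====

-- B replaces A's five sequential String.replace passes by one table-driven left-to-right
-- scan (same return value; neither mutates its argument).

-- ===== PORT A =====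
def pvMarkersA : List (String × String) := [
  ("# CONFIGURATION", "# COMMAND ----------\n# MAGIC %md\n# MAGIC ## Configuration\n\n# COMMAND ----------"),
  ("# STEP 1:", "# COMMAND ----------\n# MAGIC %md\n# MAGIC ## Step 1: Data Collection\n\n# COMMAND ----------"),
  ("# STEP 2:", "# COMMAND ----------\n# MAGIC %md\n# MAGIC ## Step 2: Data Processing\n\n# COMMAND ----------"),
  ("# STEP 3:", "# COMMAND ----------\n# MAGIC %md\n# MAGIC ## Step 3: Save to Bronze Layer\n\n# COMMAND ----------"),
  ("if __name__ == \"__main__\":", "# COMMAND ----------\n# MAGIC %md\n# MAGIC ## Main Execution\n\n# COMMAND ----------")]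

def split_into_cells (content : String) : String :=
  pvMarkersA.foldl (fun acc p => PySem.Str.replace acc p.1 p.2) content

-- ===== PORT B =====
-- the five marker/replacement pairs of B's dict, in insertion order (code points)
def pvM1 : List Char := "# CONFIGURATION".toList
def pvR1 : List Char := "# COMMAND ----------\n# MAGIC %md\n# MAGIC ## Configuration\n\n# COMMAND ----------".toList
def pvM2 : List Char := "# STEP 1:".toList
def pvR2 : List Char := "# COMMAND ----------\n# MAGIC %md\n# MAGIC ## Step 1: Data Collection\n\n# COMMAND ----------".toList
def pvM3 : List Char := "# STEP 2:".toList
def pvR3 : List Char := "# COMMAND ----------\n# MAGIC %md\n# MAGIC ## Step 2: Data Processing\n\n# COMMAND ----------".toList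
def pvM4 : List Char := "# STEP 3:".toList
def pvR4 : List Char := "# COMMAND ----------\n# MAGIC %md\n# MAGIC ## Step 3: Save to Bronze Layer\n\n# COMMAND ----------".toList
def pvM5 : List Char := "if __name__ == \"__main__\":".toList
def pvR5 : List Char := "# COMMAND ----------\n# MAGIC %md\n# MAGIC ## Main Execution\n\n# COMMAND ----------".toList

def pvTable : List (List Char × List Char) :=
  [(pvM1, pvR1), (pvM2, pvR2), (pvM3, pvR3), (pvM4, pvR4), (pvM5, pvR5)]

lemma pvTable_pos : ∀ p ∈ pvTable, 0 < p.1.length := by decide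

-- B's while loop over the positions of content: at each position, the first matching
-- marker of the table is emitted as its replacement and skipped, otherwise the character
-- is copied (content.startswith(marker, i) ↔ the marker is a prefix of the rest).
def pvScan : List Char → List Char
  | [] => []
  | c :: t =>
    match h : List.find? (fun p => p.1.isPrefixOf (c :: t)) pvTable with
    | some p => p.2 ++ pvScan (List.drop p.1.length (c :: t))
    | none => c :: pvScan t
termination_by l => l.length
decreasing_by
  · have hmem := List.mem_of_find?_eq_some h
    have hpos := pvTable_pos _ hmem
    simp only [List.length_drop, List.length_cons]
    omega
  · simp

def split_into_cells_alt (content : String) : String :=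
  String.ofList (pvScan content.toList)

-- ===== PRECONDITION & SPEC =====
def Spec_split_into_cells (content : String) (out : String) : Prop := out = split_into_cells_alt content
instance (content : String) (out : String) : Decidable (Spec_split_into_cells content out) := by unfold Spec_split_into_cells; infer_instance

-- ===== CLAIM (what is proved, stated in full; the proofs are below) =====
def Claim_equal_split_into_cells : Prop := ∀ (content : String), Dom_split_into_cells content → Spec_split_into_cells content (split_into_cells content)

-- ===== LEMMAS AND PROOFS =====

def pvF (l : List Char) : List Char :=
  PySem.Chars.replace (PySem.Chars.replace (PySem.Chars.replace (PySem.Chars.replace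
    (PySem.Chars.replace l pvM1 pvR1) pvM2 pvR2) pvM3 pvR3) pvM4 pvR4) pvM5 pvR5

lemma pv_go_acc (old new : List Char) :
    ∀ fuel l acc, PySem.Chars.replace.go old new fuel l acc
      = acc.reverse ++ PySem.Chars.replace.go old new fuel l [] := by
  intro fuel
  induction fuel with
  | zero => intro l acc; simp [PySem.Chars.replace.go]
  | succ n ih =>
    intro l acc
    cases l with
    | nil => simp [PySem.Chars.replace.go]
    | cons c t =>
      simp only [PySem.Chars.replace.go]
      by_cases hp : old.isPrefixOf (c :: t)
      · simp only [hp, if_true]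
        rw [ih _ (new.reverse ++ acc), ih _ (new.reverse ++ [])]
        simp
      · simp only [hp, if_false]
        rw [ih t (c :: acc), ih t [c]]
        simp

lemma pv_go_fuel (old new : List Char) (hold : old ≠ []) :
    ∀ fuel fuel' (l : List Char), l.length ≤ fuel → l.length ≤ fuel' →
      PySem.Chars.replace.go old new fuel l [] = PySem.Chars.replace.go old new fuel' l [] := by
  intro fuel
  induction fuel with
  | zero =>
    intro fuel' l h1 h2
    have : l = [] := List.length_eq_zero_iff.mp (Nat.le_zero.mp h1)
    subst this
    cases fuel' <;> simp [PySem.Chars.replace.go]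
  | succ n ih =>
    intro fuel' l h1 h2
    cases l with
    | nil => cases fuel' <;> simp [PySem.Chars.replace.go]
    | cons c t =>
      cases fuel' with
      | zero => simp at h2
      | succ n' =>
        simp only [PySem.Chars.replace.go]
        have hop : 0 < old.length := List.length_pos_iff.mpr hold
        by_cases hp : old.isPrefixOf (c :: t)
        · simp only [hp, if_true]
          rw [pv_go_acc, pv_go_acc old new n']
          have hd : (List.drop old.length (c :: t)).length ≤ n := by
            simp only [List.length_drop, List.length_cons]
            simp only [List.length_cons] at h1
            omega
          have hd' : (List.drop old.length (c :: t)).length ≤ n' := by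
            simp only [List.length_drop, List.length_cons]
            simp only [List.length_cons] at h2
            omega
          rw [ih n' _ hd hd']
        · simp only [hp, if_false]
          rw [pv_go_acc old new n t, pv_go_acc old new n' t]
          simp only [List.length_cons] at h1 h2
          rw [ih n' t (by omega) (by omega)]
          simp

lemma pv_replace_nil (old new : List Char) (hold : old ≠ []) :
    PySem.Chars.replace [] old new = [] := by
  simp [PySem.Chars.replace, List.isEmpty_iff, hold, PySem.Chars.replace.go]

lemma pv_replace_cons_not_prefix (old new : List Char) (hold : old ≠ []) (c : Char) (t : List Char)
    (h : ¬ old <+: (c :: t)) :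
    PySem.Chars.replace (c :: t) old new = c :: PySem.Chars.replace t old new := by
  have hp : old.isPrefixOf (c :: t) = false := by
    rw [Bool.eq_false_iff]
    intro hx
    exact h (List.isPrefixOf_iff_prefix.mp hx)
  simp only [PySem.Chars.replace, List.isEmpty_iff, hold, if_false, List.length_cons]
  simp only [PySem.Chars.replace.go, hp, if_false]
  rw [pv_go_acc old new t.length t [c]]
  simp

lemma pv_replace_consume (old new t : List Char) (hold : old ≠ []) :
    PySem.Chars.replace (old ++ t) old new = new ++ PySem.Chars.replace t old new := by
  obtain ⟨a, o', rfl⟩ := List.exists_cons_of_ne_nil hold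
  show PySem.Chars.replace (a :: (o' ++ t)) (a :: o') new
      = new ++ PySem.Chars.replace t (a :: o') new
  have hp : (a :: o').isPrefixOf (a :: (o' ++ t)) = true :=
    List.isPrefixOf_iff_prefix.mpr (List.prefix_append (a :: o') t)
  have hdrop : List.drop (o'.length + 1) (a :: (o' ++ t)) = t := by
    have h := List.drop_left (l₁ := a :: o') (l₂ := t)
    simpa using h
  simp only [PySem.Chars.replace, List.isEmpty_iff, reduceCtorEq, if_false, List.length_cons]
  simp only [PySem.Chars.replace.go, hp, if_true, List.length_cons, hdrop]
  rw [pv_go_acc]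
  simp only [List.reverse_reverse, List.append_nil]
  congr 1
  rw [show PySem.Chars.replace.go (a :: o') new t.length t []
      = PySem.Chars.replace t (a :: o') new by simp [PySem.Chars.replace]]
  rw [show PySem.Chars.replace t (a :: o') new
      = PySem.Chars.replace.go (a :: o') new t.length t [] by simp [PySem.Chars.replace]]
  exact pv_go_fuel (a :: o') new (by simp) _ _ t (by simp) (le_refl _)

lemma pv_replace_append_safe (old new : List Char) (hold : old ≠ []) :
    ∀ (r : List Char), (∀ j < r.length, ¬ (List.drop j r <+: old) ∧ ¬ (old <+: List.drop j r)) →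
      ∀ Y, PySem.Chars.replace (r ++ Y) old new = r ++ PySem.Chars.replace Y old new := by
  intro r
  induction r with
  | nil => intro _ Y; simp
  | cons a r' ih =>
    intro H Y
    have h0 := H 0 (by simp)
    simp only [List.drop_zero] at h0
    have hnp : ¬ old <+: (a :: r') ++ Y := by
      intro hp
      rcases List.prefix_or_prefix_of_prefix hp (List.prefix_append (a :: r') Y) with hx | hx
      · exact h0.2 hx
      · exact h0.1 hx
    rw [List.cons_append, pv_replace_cons_not_prefix old new hold a (r' ++ Y) (by
        rw [← List.cons_append]; exact hnp)]
    rw [ih (fun j hj => by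
      have := H (j + 1) (by simp; omega)
      simpa [List.drop_succ_cons] using this) Y]
    simp

lemma pv_replace_preserves (old new : List Char) (hold : old ≠ []) :
    ∀ (l s : List Char), (∀ j < s.length, s.length - j ≤ new.length ∧ ¬ (List.drop j s <+: new)) →
      ¬ s <+: l → ¬ s <+: PySem.Chars.replace l old new := by
  intro l
  induction l with
  | nil =>
    intro s _ h
    rw [pv_replace_nil old new hold]
    exact h
  | cons c t ih =>
    intro s Hs h
    have hs_ne : s ≠ [] := by rintro rfl; exact h List.nil_prefix
    have hslen : 0 < s.length := List.length_pos_iff.mpr hs_ne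
    by_cases hp : old <+: (c :: t)
    · obtain ⟨rest, hrest⟩ := hp
      rw [← hrest, pv_replace_consume old new rest hold]
      intro hps
      have h0 := Hs 0 hslen
      simp only [List.drop_zero, Nat.sub_zero] at h0
      exact h0.2 (List.prefix_of_prefix_length_le hps (List.prefix_append new _) h0.1)
    · rw [pv_replace_cons_not_prefix old new hold c t hp]
      obtain ⟨a, s', rfl⟩ := List.exists_cons_of_ne_nil hs_ne
      intro hps
      rw [List.cons_prefix_cons] at hps
      obtain ⟨rfl, hs'⟩ := hps
      have hs't : ¬ s' <+: t := fun hx => h (List.cons_prefix_cons.mpr ⟨rfl, hx⟩)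
      have hs'ne : s' ≠ [] := by rintro rfl; exact hs't List.nil_prefix
      exact ih s' (fun j hj => by
        have := Hs (j + 1) (by simp; omega)
        simpa [List.drop_succ_cons] using this) hs't hs'

-- helper not in g: pv_not_prefix_cons_of

lemma pv_not_prefix_cons_of (m : List Char) (c : Char) (u v : List Char)
    (h : ¬ m <+: c :: u) (hpres : ¬ (m.drop 1) <+: u → ¬ (m.drop 1) <+: v) :
    ¬ m <+: c :: v := by
  cases m with
  | nil => exact absurd List.nil_prefix h
  | cons a s =>
    intro hv
    rw [List.cons_prefix_cons] at hv
    by_cases hac : a = c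
    · subst hac
      rcases List.eq_nil_or_concat' s with rfl | _
      · exact h (List.cons_prefix_cons.mpr ⟨rfl, List.nil_prefix⟩)
      · exact hpres (fun hx => h (List.cons_prefix_cons.mpr ⟨rfl, hx⟩)) hv.2
    · exact hac hv.1


lemma pvMne1 : (pvM1 : List Char) ≠ [] := by decide
lemma pvMne2 : (pvM2 : List Char) ≠ [] := by decide
lemma pvMne3 : (pvM3 : List Char) ≠ [] := by decide
lemma pvMne4 : (pvM4 : List Char) ≠ [] := by decide
lemma pvMne5 : (pvM5 : List Char) ≠ [] := by decide
set_option maxHeartbeats 1000000 in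
set_option maxRecDepth 8192 in
lemma pvSafeMR_2_1 : ∀ j < (pvR1 : List Char).length, ¬ (List.drop j pvR1 <+: pvM2) ∧ ¬ (pvM2 <+: List.drop j pvR1) := by decide
set_option maxHeartbeats 1000000 in
set_option maxRecDepth 8192 in
lemma pvSafeMR_3_1 : ∀ j < (pvR1 : List Char).length, ¬ (List.drop j pvR1 <+: pvM3) ∧ ¬ (pvM3 <+: List.drop j pvR1) := by decide
set_option maxHeartbeats 1000000 in
set_option maxRecDepth 8192 in
lemma pvSafeMR_4_1 : ∀ j < (pvR1 : List Char).length, ¬ (List.drop j pvR1 <+: pvM4) ∧ ¬ (pvM4 <+: List.drop j pvR1) := by decide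
set_option maxHeartbeats 1000000 in
set_option maxRecDepth 8192 in
lemma pvSafeMR_5_1 : ∀ j < (pvR1 : List Char).length, ¬ (List.drop j pvR1 <+: pvM5) ∧ ¬ (pvM5 <+: List.drop j pvR1) := by decide
set_option maxHeartbeats 1000000 in
set_option maxRecDepth 8192 in
lemma pvSafeMM_1_2 : ∀ j < (pvM2 : List Char).length, ¬ (List.drop j pvM2 <+: pvM1) ∧ ¬ (pvM1 <+: List.drop j pvM2) := by decide
set_option maxHeartbeats 1000000 in
set_option maxRecDepth 8192 in
lemma pvSafeMR_3_2 : ∀ j < (pvR2 : List Char).length, ¬ (List.drop j pvR2 <+: pvM3) ∧ ¬ (pvM3 <+: List.drop j pvR2) := by decide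
set_option maxHeartbeats 1000000 in
set_option maxRecDepth 8192 in
lemma pvSafeMR_4_2 : ∀ j < (pvR2 : List Char).length, ¬ (List.drop j pvR2 <+: pvM4) ∧ ¬ (pvM4 <+: List.drop j pvR2) := by decide
set_option maxHeartbeats 1000000 in
set_option maxRecDepth 8192 in
lemma pvSafeMR_5_2 : ∀ j < (pvR2 : List Char).length, ¬ (List.drop j pvR2 <+: pvM5) ∧ ¬ (pvM5 <+: List.drop j pvR2) := by decide
set_option maxHeartbeats 1000000 in
set_option maxRecDepth 8192 in
lemma pvSafeMM_1_3 : ∀ j < (pvM3 : List Char).length, ¬ (List.drop j pvM3 <+: pvM1) ∧ ¬ (pvM1 <+: List.drop j pvM3) := by decide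
set_option maxHeartbeats 1000000 in
set_option maxRecDepth 8192 in
lemma pvSafeMM_2_3 : ∀ j < (pvM3 : List Char).length, ¬ (List.drop j pvM3 <+: pvM2) ∧ ¬ (pvM2 <+: List.drop j pvM3) := by decide
set_option maxHeartbeats 1000000 in
set_option maxRecDepth 8192 in
lemma pvSafeMR_4_3 : ∀ j < (pvR3 : List Char).length, ¬ (List.drop j pvR3 <+: pvM4) ∧ ¬ (pvM4 <+: List.drop j pvR3) := by decide
set_option maxHeartbeats 1000000 in
set_option maxRecDepth 8192 in
lemma pvSafeMR_5_3 : ∀ j < (pvR3 : List Char).length, ¬ (List.drop j pvR3 <+: pvM5) ∧ ¬ (pvM5 <+: List.drop j pvR3) := by decide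
set_option maxHeartbeats 1000000 in
set_option maxRecDepth 8192 in
lemma pvSafeMM_1_4 : ∀ j < (pvM4 : List Char).length, ¬ (List.drop j pvM4 <+: pvM1) ∧ ¬ (pvM1 <+: List.drop j pvM4) := by decide
set_option maxHeartbeats 1000000 in
set_option maxRecDepth 8192 in
lemma pvSafeMM_2_4 : ∀ j < (pvM4 : List Char).length, ¬ (List.drop j pvM4 <+: pvM2) ∧ ¬ (pvM2 <+: List.drop j pvM4) := by decide
set_option maxHeartbeats 1000000 in
set_option maxRecDepth 8192 in
lemma pvSafeMM_3_4 : ∀ j < (pvM4 : List Char).length, ¬ (List.drop j pvM4 <+: pvM3) ∧ ¬ (pvM3 <+: List.drop j pvM4) := by decide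
set_option maxHeartbeats 1000000 in
set_option maxRecDepth 8192 in
lemma pvSafeMR_5_4 : ∀ j < (pvR4 : List Char).length, ¬ (List.drop j pvR4 <+: pvM5) ∧ ¬ (pvM5 <+: List.drop j pvR4) := by decide
set_option maxHeartbeats 1000000 in
set_option maxRecDepth 8192 in
lemma pvSafeMM_1_5 : ∀ j < (pvM5 : List Char).length, ¬ (List.drop j pvM5 <+: pvM1) ∧ ¬ (pvM1 <+: List.drop j pvM5) := by decide
set_option maxHeartbeats 1000000 in
set_option maxRecDepth 8192 in
lemma pvSafeMM_2_5 : ∀ j < (pvM5 : List Char).length, ¬ (List.drop j pvM5 <+: pvM2) ∧ ¬ (pvM2 <+: List.drop j pvM5) := by decide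
set_option maxHeartbeats 1000000 in
set_option maxRecDepth 8192 in
lemma pvSafeMM_3_5 : ∀ j < (pvM5 : List Char).length, ¬ (List.drop j pvM5 <+: pvM3) ∧ ¬ (pvM3 <+: List.drop j pvM5) := by decide
set_option maxHeartbeats 1000000 in
set_option maxRecDepth 8192 in
lemma pvSafeMM_4_5 : ∀ j < (pvM5 : List Char).length, ¬ (List.drop j pvM5 <+: pvM4) ∧ ¬ (pvM4 <+: List.drop j pvM5) := by decide
set_option maxHeartbeats 1000000 in
set_option maxRecDepth 8192 in
lemma pvPres_2_1 : ∀ i < ((pvM2 : List Char).drop 1).length, ((pvM2 : List Char).drop 1).length - i ≤ (pvR1 : List Char).length ∧ ¬ (List.drop i (pvM2.drop 1) <+: pvR1) := by decide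
set_option maxHeartbeats 1000000 in
set_option maxRecDepth 8192 in
lemma pvPres_3_1 : ∀ i < ((pvM3 : List Char).drop 1).length, ((pvM3 : List Char).drop 1).length - i ≤ (pvR1 : List Char).length ∧ ¬ (List.drop i (pvM3.drop 1) <+: pvR1) := by decide
set_option maxHeartbeats 1000000 in
set_option maxRecDepth 8192 in
lemma pvPres_3_2 : ∀ i < ((pvM3 : List Char).drop 1).length, ((pvM3 : List Char).drop 1).length - i ≤ (pvR2 : List Char).length ∧ ¬ (List.drop i (pvM3.drop 1) <+: pvR2) := by decide
set_option maxHeartbeats 1000000 in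
set_option maxRecDepth 8192 in
lemma pvPres_4_1 : ∀ i < ((pvM4 : List Char).drop 1).length, ((pvM4 : List Char).drop 1).length - i ≤ (pvR1 : List Char).length ∧ ¬ (List.drop i (pvM4.drop 1) <+: pvR1) := by decide
set_option maxHeartbeats 1000000 in
set_option maxRecDepth 8192 in
lemma pvPres_4_2 : ∀ i < ((pvM4 : List Char).drop 1).length, ((pvM4 : List Char).drop 1).length - i ≤ (pvR2 : List Char).length ∧ ¬ (List.drop i (pvM4.drop 1) <+: pvR2) := by decide
set_option maxHeartbeats 1000000 in
set_option maxRecDepth 8192 in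
lemma pvPres_4_3 : ∀ i < ((pvM4 : List Char).drop 1).length, ((pvM4 : List Char).drop 1).length - i ≤ (pvR3 : List Char).length ∧ ¬ (List.drop i (pvM4.drop 1) <+: pvR3) := by decide
set_option maxHeartbeats 1000000 in
set_option maxRecDepth 8192 in
lemma pvPres_5_1 : ∀ i < ((pvM5 : List Char).drop 1).length, ((pvM5 : List Char).drop 1).length - i ≤ (pvR1 : List Char).length ∧ ¬ (List.drop i (pvM5.drop 1) <+: pvR1) := by decide
set_option maxHeartbeats 1000000 in
set_option maxRecDepth 8192 in
lemma pvPres_5_2 : ∀ i < ((pvM5 : List Char).drop 1).length, ((pvM5 : List Char).drop 1).length - i ≤ (pvR2 : List Char).length ∧ ¬ (List.drop i (pvM5.drop 1) <+: pvR2) := by decide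
set_option maxHeartbeats 1000000 in
set_option maxRecDepth 8192 in
lemma pvPres_5_3 : ∀ i < ((pvM5 : List Char).drop 1).length, ((pvM5 : List Char).drop 1).length - i ≤ (pvR3 : List Char).length ∧ ¬ (List.drop i (pvM5.drop 1) <+: pvR3) := by decide
set_option maxHeartbeats 1000000 in
set_option maxRecDepth 8192 in
lemma pvPres_5_4 : ∀ i < ((pvM5 : List Char).drop 1).length, ((pvM5 : List Char).drop 1).length - i ≤ (pvR4 : List Char).length ∧ ¬ (List.drop i (pvM5.drop 1) <+: pvR4) := by decide

lemma pv_key_nil : pvF [] = pvScan [] := by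
  have h2 : pvScan [] = [] := by rw [pvScan.eq_def]
  rw [h2, pvF]
  rw [pv_replace_nil pvM1 pvR1 pvMne1, pv_replace_nil pvM2 pvR2 pvMne2,
      pv_replace_nil pvM3 pvR3 pvMne3, pv_replace_nil pvM4 pvR4 pvMne4,
      pv_replace_nil pvM5 pvR5 pvMne5]

lemma pv_key_aux : ∀ n, ∀ l : List Char, l.length ≤ n → pvF l = pvScan l := by
  intro n
  induction n with
  | zero =>
    intro l hl
    have hnil : l = [] := List.length_eq_zero_iff.mp (Nat.le_zero.mp hl)
    subst hnil
    exact pv_key_nil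
  | succ n ih =>
    intro l hl
    cases l with
    | nil => exact pv_key_nil
    | cons c t =>
      rw [pvScan.eq_def]
      dsimp only
      split
      · rename_i p hfind
        have hmem := List.mem_of_find?_eq_some hfind
        have hpref : p.1 <+: (c :: t) := by
          have hx := List.find?_some hfind
          exact List.isPrefixOf_iff_prefix.mp (by simpa using hx)
        simp only [pvTable, List.mem_cons, List.not_mem_nil, or_false] at hmem
        rcases hmem with rfl | rfl | rfl | rfl | rfl
        · -- p = (pvM1, pvR1)
          obtain ⟨rest, hrest⟩ := hpref
          dsimp only at hrest ⊢
          rw [← hrest, List.drop_left, pvF]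
          rw [pv_replace_consume pvM1 pvR1 _ pvMne1]
          rw [pv_replace_append_safe pvM2 pvR2 pvMne2 pvR1 pvSafeMR_2_1 _]
          rw [pv_replace_append_safe pvM3 pvR3 pvMne3 pvR1 pvSafeMR_3_1 _]
          rw [pv_replace_append_safe pvM4 pvR4 pvMne4 pvR1 pvSafeMR_4_1 _]
          rw [pv_replace_append_safe pvM5 pvR5 pvMne5 pvR1 pvSafeMR_5_1 _]
          have hrl : rest.length ≤ n := by
            have hlen := congrArg List.length hrest
            simp only [List.length_append, List.length_cons] at hlen
            have hm : (pvM1 : List Char).length = 15 := by decide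
            simp only [List.length_cons] at hl
            omega
          have hc := ih rest hrl
          rw [pvF] at hc
          rw [hc]
        · -- p = (pvM2, pvR2)
          obtain ⟨rest, hrest⟩ := hpref
          dsimp only at hrest ⊢
          rw [← hrest, List.drop_left, pvF]
          rw [pv_replace_append_safe pvM1 pvR1 pvMne1 pvM2 pvSafeMM_1_2 _]
          rw [pv_replace_consume pvM2 pvR2 _ pvMne2]
          rw [pv_replace_append_safe pvM3 pvR3 pvMne3 pvR2 pvSafeMR_3_2 _]
          rw [pv_replace_append_safe pvM4 pvR4 pvMne4 pvR2 pvSafeMR_4_2 _]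
          rw [pv_replace_append_safe pvM5 pvR5 pvMne5 pvR2 pvSafeMR_5_2 _]
          have hrl : rest.length ≤ n := by
            have hlen := congrArg List.length hrest
            simp only [List.length_append, List.length_cons] at hlen
            have hm : (pvM2 : List Char).length = 9 := by decide
            simp only [List.length_cons] at hl
            omega
          have hc := ih rest hrl
          rw [pvF] at hc
          rw [hc]
        · -- p = (pvM3, pvR3)
          obtain ⟨rest, hrest⟩ := hpref
          dsimp only at hrest ⊢
          rw [← hrest, List.drop_left, pvF]
          rw [pv_replace_append_safe pvM1 pvR1 pvMne1 pvM3 pvSafeMM_1_3 _]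
          rw [pv_replace_append_safe pvM2 pvR2 pvMne2 pvM3 pvSafeMM_2_3 _]
          rw [pv_replace_consume pvM3 pvR3 _ pvMne3]
          rw [pv_replace_append_safe pvM4 pvR4 pvMne4 pvR3 pvSafeMR_4_3 _]
          rw [pv_replace_append_safe pvM5 pvR5 pvMne5 pvR3 pvSafeMR_5_3 _]
          have hrl : rest.length ≤ n := by
            have hlen := congrArg List.length hrest
            simp only [List.length_append, List.length_cons] at hlen
            have hm : (pvM3 : List Char).length = 9 := by decide
            simp only [List.length_cons] at hl
            omega
          have hc := ih rest hrl
          rw [pvF] at hc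
          rw [hc]
        · -- p = (pvM4, pvR4)
          obtain ⟨rest, hrest⟩ := hpref
          dsimp only at hrest ⊢
          rw [← hrest, List.drop_left, pvF]
          rw [pv_replace_append_safe pvM1 pvR1 pvMne1 pvM4 pvSafeMM_1_4 _]
          rw [pv_replace_append_safe pvM2 pvR2 pvMne2 pvM4 pvSafeMM_2_4 _]
          rw [pv_replace_append_safe pvM3 pvR3 pvMne3 pvM4 pvSafeMM_3_4 _]
          rw [pv_replace_consume pvM4 pvR4 _ pvMne4]
          rw [pv_replace_append_safe pvM5 pvR5 pvMne5 pvR4 pvSafeMR_5_4 _]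
          have hrl : rest.length ≤ n := by
            have hlen := congrArg List.length hrest
            simp only [List.length_append, List.length_cons] at hlen
            have hm : (pvM4 : List Char).length = 9 := by decide
            simp only [List.length_cons] at hl
            omega
          have hc := ih rest hrl
          rw [pvF] at hc
          rw [hc]
        · -- p = (pvM5, pvR5)
          obtain ⟨rest, hrest⟩ := hpref
          dsimp only at hrest ⊢
          rw [← hrest, List.drop_left, pvF]
          rw [pv_replace_append_safe pvM1 pvR1 pvMne1 pvM5 pvSafeMM_1_5 _]
          rw [pv_replace_append_safe pvM2 pvR2 pvMne2 pvM5 pvSafeMM_2_5 _]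
          rw [pv_replace_append_safe pvM3 pvR3 pvMne3 pvM5 pvSafeMM_3_5 _]
          rw [pv_replace_append_safe pvM4 pvR4 pvMne4 pvM5 pvSafeMM_4_5 _]
          rw [pv_replace_consume pvM5 pvR5 _ pvMne5]
          have hrl : rest.length ≤ n := by
            have hlen := congrArg List.length hrest
            simp only [List.length_append, List.length_cons] at hlen
            have hm : (pvM5 : List Char).length = 26 := by decide
            simp only [List.length_cons] at hl
            omega
          have hc := ih rest hrl
          rw [pvF] at hc
          rw [hc]
      · rename_i hfind
        have hall := List.find?_eq_none.mp hfind
        simp only [List.isPrefixOf_iff_prefix] at hall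
        have h1 : ¬ pvM1 <+: (c :: t) := by
          have hx := hall (pvM1, pvR1) (by simp [pvTable])
          simp only [List.isPrefixOf_iff_prefix] at hx
          simpa using hx
        have h2 : ¬ pvM2 <+: (c :: t) := by
          have hx := hall (pvM2, pvR2) (by simp [pvTable])
          simp only [List.isPrefixOf_iff_prefix] at hx
          simpa using hx
        have h3 : ¬ pvM3 <+: (c :: t) := by
          have hx := hall (pvM3, pvR3) (by simp [pvTable])
          simp only [List.isPrefixOf_iff_prefix] at hx
          simpa using hx
        have h4 : ¬ pvM4 <+: (c :: t) := by
          have hx := hall (pvM4, pvR4) (by simp [pvTable])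
          simp only [List.isPrefixOf_iff_prefix] at hx
          simpa using hx
        have h5 : ¬ pvM5 <+: (c :: t) := by
          have hx := hall (pvM5, pvR5) (by simp [pvTable])
          simp only [List.isPrefixOf_iff_prefix] at hx
          simpa using hx
        rw [pvF]
        rw [pv_replace_cons_not_prefix pvM1 pvR1 pvMne1 c t h1]
        have h2' : ¬ pvM2 <+: c :: (PySem.Chars.replace t pvM1 pvR1) :=
          pv_not_prefix_cons_of pvM2 c t _ h2 (fun hn => (pv_replace_preserves pvM1 pvR1 pvMne1 _ (pvM2.drop 1) (pvPres_2_1) hn))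
        rw [pv_replace_cons_not_prefix pvM2 pvR2 pvMne2 c _ h2']
        have h3' : ¬ pvM3 <+: c :: (PySem.Chars.replace (PySem.Chars.replace t pvM1 pvR1) pvM2 pvR2) :=
          pv_not_prefix_cons_of pvM3 c t _ h3 (fun hn => (pv_replace_preserves pvM2 pvR2 pvMne2 _ (pvM3.drop 1) (pvPres_3_2) (pv_replace_preserves pvM1 pvR1 pvMne1 _ (pvM3.drop 1) (pvPres_3_1) hn)))
        rw [pv_replace_cons_not_prefix pvM3 pvR3 pvMne3 c _ h3']
        have h4' : ¬ pvM4 <+: c :: (PySem.Chars.replace (PySem.Chars.replace (PySem.Chars.replace t pvM1 pvR1) pvM2 pvR2) pvM3 pvR3) :=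
          pv_not_prefix_cons_of pvM4 c t _ h4 (fun hn => (pv_replace_preserves pvM3 pvR3 pvMne3 _ (pvM4.drop 1) (pvPres_4_3) (pv_replace_preserves pvM2 pvR2 pvMne2 _ (pvM4.drop 1) (pvPres_4_2) (pv_replace_preserves pvM1 pvR1 pvMne1 _ (pvM4.drop 1) (pvPres_4_1) hn))))
        rw [pv_replace_cons_not_prefix pvM4 pvR4 pvMne4 c _ h4']
        have h5' : ¬ pvM5 <+: c :: (PySem.Chars.replace (PySem.Chars.replace (PySem.Chars.replace (PySem.Chars.replace t pvM1 pvR1) pvM2 pvR2) pvM3 pvR3) pvM4 pvR4) :=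
          pv_not_prefix_cons_of pvM5 c t _ h5 (fun hn => (pv_replace_preserves pvM4 pvR4 pvMne4 _ (pvM5.drop 1) (pvPres_5_4) (pv_replace_preserves pvM3 pvR3 pvMne3 _ (pvM5.drop 1) (pvPres_5_3) (pv_replace_preserves pvM2 pvR2 pvMne2 _ (pvM5.drop 1) (pvPres_5_2) (pv_replace_preserves pvM1 pvR1 pvMne1 _ (pvM5.drop 1) (pvPres_5_1) hn)))))
        rw [pv_replace_cons_not_prefix pvM5 pvR5 pvMne5 c _ h5']
        have hc := ih t (by simp only [List.length_cons] at hl; omega)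
        rw [pvF] at hc
        rw [hc]

lemma pv_key : ∀ l : List Char, pvF l = pvScan l :=
  fun l => pv_key_aux l.length l (le_refl _)

-- ===== VERDICT (by name: the statement is the Claim_ definition above) =====
theorem split_into_cells_spec : Claim_equal_split_into_cells := by
  intro content _
  unfold Spec_split_into_cells split_into_cells split_into_cells_alt pvMarkersA
  simp only [List.foldl, PySem.Str.replace, String.toList_ofList]
  exact congrArg String.ofList (pv_key content.toList)
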